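-- pv_equiv track=rewrite | github.com/Rollpopptery/circuitbloom | gen_sch.py | _indent_block
-- ===== SOURCE A (Python) =====
-- def _indent_block(text, tab_level):
--     """Re-indent an S-expression block to the given tab level."""
--     lines = text.split('\n')
--     result = []
--     for i, line in enumerate(lines):
--         stripped = line.lstrip('\t')
--         if i == 0:
--             # First line gets the target indent
--             result.append('\t' * tab_level + stripped)
--         else:
--             # Subsequent lines: count original indent and add offset
--             orig_tabs = len(line) - len(stripped)
--             # Add tab_level to whatever indent was there
--             result.append('\t' * (orig_tabs + tab_level) + stripped)
--     return '\n'.join(result)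
-- ===== SOURCE B (Python) =====
-- def _indent_block(text, tab_level):
--     """Re-indent an S-expression block to the given tab level."""
--     prefix = '\t' * tab_level
--     head, sep, tail = text.partition('\n')
--     out = prefix + head.lstrip('\t')
--     if sep:
--         out += '\n' + prefix + tail.replace('\n', '\n' + prefix)
--     return out
-- ===== Notes on version B (the rewrite author's own statement) =====
-- stated objective: alternative
-- what changed: Replaces the per-line enumerate loop with tab counting and list-join by one partition at the first newline plus a single bulk str.replace that inserts the tab prefix after every remaining newline (for non-first lines '\t'*(orig_tabs+tab_level)+stripped is just '\t'*tab_level+line, so no tab counting is needed).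
-- outside the precondition, e.g. on _indent_block('\ta\n\t\tb', -1): A returns 'a\n\tb', B returns 'a\n\t\tb'
import Mathlib
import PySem

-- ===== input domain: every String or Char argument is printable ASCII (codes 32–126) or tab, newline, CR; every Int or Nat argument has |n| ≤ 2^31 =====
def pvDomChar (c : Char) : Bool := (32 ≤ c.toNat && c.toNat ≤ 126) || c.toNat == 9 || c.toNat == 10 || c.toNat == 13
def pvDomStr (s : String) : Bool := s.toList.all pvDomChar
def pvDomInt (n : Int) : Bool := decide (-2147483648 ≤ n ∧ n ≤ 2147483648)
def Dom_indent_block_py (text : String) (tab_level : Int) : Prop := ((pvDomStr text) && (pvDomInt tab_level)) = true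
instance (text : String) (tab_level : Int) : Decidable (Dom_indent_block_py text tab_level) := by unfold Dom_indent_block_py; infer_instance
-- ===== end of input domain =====

-- B replaces A's per-line enumerate loop with tab counting by one partition at the first newline
-- plus one bulk replace that inserts the tab prefix after every later newline (objective:
-- alternative decomposition; return value only, neither version mutates its arguments).

-- ===== PORT A =====
-- A's loop body: the 'for i, line in enumerate(lines)' body appending to result
def stepA (tab_level : Int) (res : List (List Char)) (p : Int × List Char) : List (List Char) :=
  let line := p.2
  let stripped := line.dropWhile (fun c => c == '\t')
  if p.1 == 0 then
    res ++ [PySem.List.pyRepeat ['\t'] tab_level ++ stripped]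
  else
    let orig_tabs : Int := (line.length : Int) - (stripped.length : Int)
    res ++ [PySem.List.pyRepeat ['\t'] (orig_tabs + tab_level) ++ stripped]

def indent_block_py (text : String) (tab_level : Int) : String :=
  let lines := PySem.Chars.splitOn text.toList ['\n']
  let result := (PySem.List.enumerate lines 0).foldl (stepA tab_level) []
  String.ofList (PySem.Chars.join ['\n'] result)

-- ===== PORT B =====
def indent_block_py_alt (text : String) (tab_level : Int) : String :=
  let pre := PySem.List.pyRepeat ['\t'] tab_level
  let cs := text.toList
  let head := cs.takeWhile (fun c => c != '\n')
  let rest := cs.dropWhile (fun c => c != '\n')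
  let out := pre ++ head.dropWhile (fun c => c == '\t')
  match rest with
  | [] => String.ofList out
  | _ :: tail => String.ofList (out ++ '\n' :: (pre ++ PySem.Chars.replace tail ['\n'] ('\n' :: pre)))

-- ===== PRECONDITION & SPEC =====
-- Pre_ restricts to the function's natural domain of nonnegative tab levels: a negative
-- tab_level is a de-indent request no caller makes, on which A clamps '\t'*(orig_tabs+tab_level)
-- per line (partially deleting existing indentation) while B prepends an empty prefix, so the
-- two can differ there.
def Pre_indent_block_py (text : String) (tab_level : Int) : Prop := 0 ≤ tab_level
instance (text : String) (tab_level : Int) : Decidable (Pre_indent_block_py text tab_level) := by unfold Pre_indent_block_py; infer_instance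
def pvWitness_indent_block_py : String × Int := ("(a\n\tb\n\nc)", 1)

def Spec_indent_block_py (text : String) (tab_level : Int) (out : String) : Prop := out = indent_block_py_alt text tab_level
instance (text : String) (tab_level : Int) (out : String) : Decidable (Spec_indent_block_py text tab_level out) := by unfold Spec_indent_block_py; infer_instance

-- ===== CLAIM (what is proved, stated in full; the proofs are below) =====
def Claim_equal_indent_block_py : Prop := ∀ (text : String) (tab_level : Int), Dom_indent_block_py text tab_level → Pre_indent_block_py text tab_level → Spec_indent_block_py text tab_level (indent_block_py text tab_level)

-- ===== LEMMAS AND PROOFS =====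

def splitNl : List Char → List (List Char)
  | [] => [[]]
  | c :: t => if c == '\n' then [] :: splitNl t else (splitNl t).modifyHead (c :: ·)

theorem splitNl_ne_nil (cs : List Char) : splitNl cs ≠ [] := by
  cases cs with
  | nil => simp [splitNl]
  | cons c t =>
    simp only [splitNl]
    split_ifs <;> cases h : splitNl t <;> simp_all [List.modifyHead]
    exact splitNl_ne_nil t h

theorem modifyHead_splitNl (f : List Char → List Char) (cs : List Char) :
    (splitNl cs).modifyHead f = f ((splitNl cs).headI) :: (splitNl cs).tail := by
  cases h : splitNl cs with
  | nil => exact absurd h (splitNl_ne_nil cs)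
  | cons a t => simp [List.modifyHead]

theorem splitOn_go_eq (fuel : Nat) (l cur : List Char) (acc : List (List Char)) (h : l.length < fuel) :
    PySem.Chars.splitOn.go ['\n'] fuel l cur acc
      = acc.reverse ++ (splitNl l).modifyHead (cur.reverse ++ ·) := by
  induction fuel generalizing l cur acc with
  | zero => omega
  | succ fuel ih =>
    cases l with
    | nil =>
      rw [PySem.Chars.splitOn.go.eq_def]
      simp [splitNl]
    | cons c rest =>
      rw [PySem.Chars.splitOn.go.eq_def]
      by_cases hc : c = '\n'
      · subst hc
        have hp : List.isPrefixOf ['\n'] ('\n' :: rest) = true := by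
          simp [List.isPrefixOf]
        simp only [hp, if_true, List.length_cons, List.drop_succ_cons, List.length_nil, List.drop_zero]
        rw [ih rest [] ((cur.reverse) :: acc) (by simp at h ⊢; omega)]
        simp only [splitNl, modifyHead_splitNl]
        cases hsp : splitNl rest with
        | nil => exact absurd hsp (splitNl_ne_nil rest)
        | cons a t => simp
      · have hp : List.isPrefixOf ['\n'] (c :: rest) = false := by
          simp [List.isPrefixOf]
          intro hcontra
          exact absurd hcontra.symm hc
        simp only [hp]
        rw [ih rest (c :: cur) acc (by simp at h ⊢; omega)]
        simp only [splitNl, hc, beq_iff_eq]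
        rw [modifyHead_splitNl, modifyHead_splitNl]
        simp

theorem splitOn_nl_eq (cs : List Char) : PySem.Chars.splitOn cs ['\n'] = splitNl cs := by
  have := splitOn_go_eq (cs.length + 1) cs [] [] (by omega)
  rw [PySem.Chars.splitOn, this, modifyHead_splitNl]
  cases hsp : splitNl cs with
  | nil => exact absurd hsp (splitNl_ne_nil cs)
  | cons a t => simp

theorem inter_cons_ne (s x : List Char) (ys : List (List Char)) (h : ys ≠ []) :
    List.intercalate s (x :: ys) = x ++ s ++ List.intercalate s ys := by
  cases ys with
  | nil => exact absurd rfl h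
  | cons y t => simp [List.intercalate, List.intersperse]

theorem replace_go_eq (new : List Char) (fuel : Nat) (l acc : List Char) (h : l.length ≤ fuel) :
    PySem.Chars.replace.go ['\n'] new fuel l acc
      = acc.reverse ++ List.intercalate new (splitNl l) := by
  induction fuel generalizing l acc with
  | zero =>
    have hl : l = [] := by simpa using h
    subst hl
    rw [PySem.Chars.replace.go.eq_def]
    simp [splitNl, List.intercalate]
  | succ fuel ih =>
    cases l with
    | nil =>
      rw [PySem.Chars.replace.go.eq_def]
      simp [splitNl, List.intercalate]
    | cons c rest =>
      rw [PySem.Chars.replace.go.eq_def]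
      by_cases hc : c = '\n'
      · subst hc
        have hp : List.isPrefixOf ['\n'] ('\n' :: rest) = true := by
          simp [List.isPrefixOf]
        simp only [hp, if_true, List.length_cons, List.drop_succ_cons, List.length_nil, List.drop_zero]
        rw [ih rest (new.reverse ++ acc) (by simp at h ⊢; omega)]
        rw [show splitNl ('\n' :: rest) = [] :: splitNl rest by simp [splitNl]]
        rw [inter_cons_ne _ _ _ (splitNl_ne_nil rest)]
        simp
      · have hp : List.isPrefixOf ['\n'] (c :: rest) = false := by
          simp [List.isPrefixOf]
          intro hcontra
          exact absurd hcontra.symm hc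
        simp only [hp, Bool.false_eq_true]
        rw [ih rest (c :: acc) (by simp at h ⊢; omega)]
        rw [show splitNl (c :: rest) = (splitNl rest).modifyHead (c :: ·) by
          simp [splitNl, hc]]
        rw [modifyHead_splitNl]
        cases hsp : splitNl rest with
        | nil => exact absurd hsp (splitNl_ne_nil rest)
        | cons a t =>
          cases t with
          | nil => simp [List.intercalate]
          | cons b u =>
            simp only [List.headI_cons, List.tail_cons]
            rw [inter_cons_ne _ (c :: a) (b :: u) (by simp), inter_cons_ne _ a (b :: u) (by simp)]
            simp

theorem replace_nl_eq (cs new : List Char) :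
    PySem.Chars.replace cs ['\n'] new = List.intercalate new (splitNl cs) := by
  rw [PySem.Chars.replace]
  simp only [List.isEmpty_cons, Bool.false_eq_true, if_false]
  simpa using replace_go_eq new cs.length cs [] (le_refl _)

theorem splitNl_no (cs : List Char) (h : cs.dropWhile (fun c => c != '\n') = []) :
    splitNl cs = [cs] := by
  induction cs with
  | nil => simp [splitNl]
  | cons c rest ih =>
    by_cases hc : c = '\n'
    · subst hc; simp at h
    · simp only [List.dropWhile_cons, bne_iff_ne, ne_eq, hc, not_false_eq_true, if_true] at h
      simp only [splitNl, beq_iff_eq, hc, ih h, List.modifyHead]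
      simp

theorem splitNl_yes (cs : List Char) (d : Char) (t : List Char)
    (h : cs.dropWhile (fun c => c != '\n') = d :: t) :
    splitNl cs = cs.takeWhile (fun c => c != '\n') :: splitNl t := by
  induction cs with
  | nil => simp at h
  | cons c rest ih =>
    by_cases hc : c = '\n'
    · subst hc
      simp only [List.dropWhile_cons, bne_self_eq_false] at h
      obtain ⟨rfl, rfl⟩ := h
      simp [splitNl, List.takeWhile]
    · simp [hc] at h
      rw [show splitNl (c :: rest) = (splitNl rest).modifyHead (c :: ·) by simp [splitNl, hc]]
      rw [ih h]
      have hb : (c != '\n') = true := by simp [hc]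
      simp [List.modifyHead, hb]

theorem line_eq (tl : Int) (h : 0 ≤ tl) (line : List Char) :
    PySem.List.pyRepeat ['\t'] (((line.length : Int) - ((line.dropWhile (fun c => c == '\t')).length : Int)) + tl)
        ++ line.dropWhile (fun c => c == '\t')
      = PySem.List.pyRepeat ['\t'] tl ++ line := by
  have hsplit := (List.takeWhile_append_dropWhile (p := fun c => c == '\t') (l := line)).symm
  have hrep : line.takeWhile (fun c => c == '\t')
      = List.replicate (line.takeWhile (fun c => c == '\t')).length '\t' := by
    rw [List.eq_replicate_iff]
    exact ⟨rfl, fun b hb => by simpa using List.mem_takeWhile_imp hb⟩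
  have hlen : line.length
      = (line.takeWhile (fun c => c == '\t')).length + (line.dropWhile (fun c => c == '\t')).length := by
    conv_lhs => rw [hsplit]
    rw [List.length_append]
  rw [PySem.List.pyRepeat_singleton, PySem.List.pyRepeat_singleton]
  have harith : (((line.length : Int) - ((line.dropWhile (fun c => c == '\t')).length : Int)) + tl).toNat
      = tl.toNat + (line.takeWhile (fun c => c == '\t')).length := by
    omega
  rw [harith, List.replicate_add]
  conv_rhs => rw [hsplit, hrep]
  rw [List.append_assoc]

theorem foldl_stepA_pos (tl : Int) (t : List (List Char)) :
    ∀ (s : Int) (res : List (List Char)), 1 ≤ s →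
    (PySem.List.enumerate t s).foldl (stepA tl) res
      = res ++ t.map (fun line =>
          PySem.List.pyRepeat ['\t'] (((line.length : Int) - ((line.dropWhile (fun c => c == '\t')).length : Int)) + tl)
            ++ line.dropWhile (fun c => c == '\t')) := by
  induction t with
  | nil => intro s res _; simp [PySem.List.enumerate]
  | cons x xs ih =>
    intro s res hs
    rw [PySem.List.enumerate_cons]
    simp only [List.foldl_cons]
    rw [ih (s + 1) _ (by omega)]
    have hz : (s == 0) = false := by simp; omega
    simp [stepA, hz]

theorem inter_map_pre (pre : List Char) (ys : List (List Char)) (h : ys ≠ []) :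
    List.intercalate ['\n'] (ys.map (fun l => pre ++ l))
      = pre ++ List.intercalate ('\n' :: pre) ys := by
  induction ys with
  | nil => exact absurd rfl h
  | cons y t ih =>
    cases t with
    | nil => simp [List.intercalate]
    | cons z u =>
      rw [List.map_cons, inter_cons_ne _ _ _ (by simp)]
      rw [ih (by simp)]
      rw [inter_cons_ne ('\n' :: pre) y (z :: u) (by simp)]
      simp

theorem main_spec (text : String) (tab_level : Int) (hpre : 0 ≤ tab_level) :
    indent_block_py text tab_level = indent_block_py_alt text tab_level := by
  simp only [indent_block_py, indent_block_py_alt]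
  rw [splitOn_nl_eq]
  cases hrest : text.toList.dropWhile (fun c => c != '\n') with
  | nil =>
    rw [splitNl_no _ hrest]
    have htake : text.toList.takeWhile (fun c => c != '\n') = text.toList := by
      conv_rhs => rw [← List.takeWhile_append_dropWhile (p := fun c => c != '\n') (l := text.toList)]
      rw [hrest, List.append_nil]
    rw [htake]
    simp [PySem.List.enumerate, stepA, PySem.Chars.join, List.intercalate]
  | cons d t0 =>
    rw [splitNl_yes _ _ _ hrest]
    rw [PySem.List.enumerate_cons]
    simp only [List.foldl_cons]
    rw [show ((0:Int) + 1) = 1 by norm_num]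
    rw [foldl_stepA_pos tab_level _ 1 _ (le_refl _)]
    simp only [line_eq tab_level hpre]
    rw [show stepA tab_level [] (0, text.toList.takeWhile (fun c => c != '\n'))
        = [PySem.List.pyRepeat ['\t'] tab_level
            ++ (text.toList.takeWhile (fun c => c != '\n')).dropWhile (fun c => c == '\t')] by
      simp [stepA]]
    simp only [PySem.Chars.join]
    rw [List.singleton_append]
    rw [inter_cons_ne _ _ _ (by
      cases hsp : splitNl t0 with
      | nil => exact absurd hsp (splitNl_ne_nil t0)
      | cons a u => simp)]
    rw [inter_map_pre _ _ (splitNl_ne_nil t0)]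
    rw [replace_nl_eq]
    simp

-- ===== VERDICT (by name: the statement is the Claim_ definition above) =====
theorem indent_block_py_spec : Claim_equal_indent_block_py := by
  intro text tab_level _hdom hpre
  unfold Spec_indent_block_py
  exact main_spec text tab_level hpre
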